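-- pv_equiv track=rewrite | github.com/mohanavamsi20/Shelf_assignment | core/locations.py | divide_grid_into_quarters
-- ===== SOURCE A (Python) =====
-- def divide_grid_into_quarters(grid):
--     rows = len(grid)
--     cols = len(grid[0])
--
--     half_rows = rows // 2
--     half_cols = cols // 2
--
--     result = {}
--
--     top_left = [(i, j) for i in range(half_rows) for j in range(half_cols)]
--     top_right = [(i, j) for i in range(half_rows) for j in range(half_cols, cols)]
--     bottom_left = [(i, j) for i in range(half_rows, rows) for j in range(half_cols)]
--     bottom_right = [(i, j) for i in range(half_rows, rows) for j in range(half_cols, cols)]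
--
--     result["top_left"] = top_left
--     result["top_right"] = top_right
--     result["bottom_left"] = bottom_left
--     result["bottom_right"] = bottom_right
--
--     return result
-- ===== SOURCE B (Python) =====
-- def divide_grid_into_quarters(grid):
--     rows = len(grid)
--     cols = len(grid[0])
--     half_rows = rows // 2
--     half_cols = cols // 2
--     top_left, top_right, bottom_left, bottom_right = [], [], [], []
--     for i in range(rows):
--         for j in range(cols):
--             if i < half_rows and j < half_cols:
--                 top_left.append((i, j))
--             elif i < half_rows:
--                 top_right.append((i, j))
--             elif j < half_cols:
--                 bottom_left.append((i, j))
--             else: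
--                 bottom_right.append((i, j))
--     return {"top_left": top_left, "top_right": top_right,
--             "bottom_left": bottom_left, "bottom_right": bottom_right}
-- ===== Notes on version B (the rewrite author's own statement) =====
-- stated objective: alternative
-- what changed: Replaces A's four separate range-bounded comprehensions by one single classifying pass over all cells with a 4-way branch appending each cell to its quadrant list.
-- outside the precondition, e.g. on divide_grid_into_quarters([]): A raises IndexError, B raises IndexError
import Mathlib
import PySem

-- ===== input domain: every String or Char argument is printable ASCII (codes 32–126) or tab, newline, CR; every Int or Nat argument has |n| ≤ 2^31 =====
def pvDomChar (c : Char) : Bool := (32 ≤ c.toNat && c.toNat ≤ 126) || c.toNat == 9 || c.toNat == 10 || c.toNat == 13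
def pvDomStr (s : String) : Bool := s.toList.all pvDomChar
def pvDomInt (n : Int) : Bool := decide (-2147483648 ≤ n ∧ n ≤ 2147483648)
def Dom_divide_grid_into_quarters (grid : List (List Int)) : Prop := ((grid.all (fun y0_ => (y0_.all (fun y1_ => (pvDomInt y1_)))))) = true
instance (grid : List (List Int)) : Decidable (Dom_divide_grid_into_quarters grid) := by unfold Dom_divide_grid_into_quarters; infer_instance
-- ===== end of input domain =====

-- B replaces A's four separate range-bounded comprehensions by one classifying pass
-- over all cells (same cost); equivalence is over non-empty grids.

-- ===== PORT A =====
def divide_grid_into_quarters (grid : List (List Int)) : List (String × List (Int × Int)) :=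
  match PySem.List.pyGet? grid 0 with
  | none => []   -- grid[0] raises IndexError; excluded by Pre_
  | some row0 =>
    let rows : Int := grid.length
    let cols : Int := row0.length
    let half_rows : Int := PySem.Int.floordiv rows 2
    let half_cols : Int := PySem.Int.floordiv cols 2
    let top_left := (PySem.List.pyRange 0 half_rows 1).flatMap
      (fun i => (PySem.List.pyRange 0 half_cols 1).map (fun j => (i, j)))
    let top_right := (PySem.List.pyRange 0 half_rows 1).flatMap
      (fun i => (PySem.List.pyRange half_cols cols 1).map (fun j => (i, j)))
    let bottom_left := (PySem.List.pyRange half_rows rows 1).flatMap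
      (fun i => (PySem.List.pyRange 0 half_cols 1).map (fun j => (i, j)))
    let bottom_right := (PySem.List.pyRange half_rows rows 1).flatMap
      (fun i => (PySem.List.pyRange half_cols cols 1).map (fun j => (i, j)))
    ((((PySem.Dict.empty.insert "top_left" top_left).insert "top_right" top_right).insert
        "bottom_left" bottom_left).insert "bottom_right" bottom_right).items

-- ===== PORT B =====
def divide_grid_into_quarters_alt (grid : List (List Int)) : List (String × List (Int × Int)) :=
  match PySem.List.pyGet? grid 0 with
  | none => []   -- grid[0] raises IndexError; excluded by Pre_
  | some row0 =>
    let rows : Int := grid.length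
    let cols : Int := row0.length
    let half_rows : Int := PySem.Int.floordiv rows 2
    let half_cols : Int := PySem.Int.floordiv cols 2
    let st := (PySem.List.pyRange 0 rows 1).foldl
      (fun s i => (PySem.List.pyRange 0 cols 1).foldl
        (fun (s : List (Int × Int) × List (Int × Int) × List (Int × Int) × List (Int × Int)) j =>
          if i < half_rows ∧ j < half_cols then (s.1 ++ [(i, j)], s.2.1, s.2.2.1, s.2.2.2)
          else if i < half_rows then (s.1, s.2.1 ++ [(i, j)], s.2.2.1, s.2.2.2)
          else if j < half_cols then (s.1, s.2.1, s.2.2.1 ++ [(i, j)], s.2.2.2)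
          else (s.1, s.2.1, s.2.2.1, s.2.2.2 ++ [(i, j)])) s)
      ([], [], [], [])
    ((((PySem.Dict.empty.insert "top_left" st.1).insert "top_right" st.2.1).insert
        "bottom_left" st.2.2.1).insert "bottom_right" st.2.2.2).items

-- ===== PRECONDITION & SPEC =====
-- Pre_ excludes the empty grid, on which Python A (and B) raises IndexError at grid[0].
def Pre_divide_grid_into_quarters (grid : List (List Int)) : Prop := grid ≠ []
instance (grid : List (List Int)) : Decidable (Pre_divide_grid_into_quarters grid) := by unfold Pre_divide_grid_into_quarters; infer_instance
def pvWitness_divide_grid_into_quarters : List (List Int) := [[1, 2], [3, 4]]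

def Spec_divide_grid_into_quarters (grid : List (List Int)) (out : List (String × List (Int × Int))) : Prop := out = divide_grid_into_quarters_alt grid
instance (grid : List (List Int)) (out : List (String × List (Int × Int))) : Decidable (Spec_divide_grid_into_quarters grid out) := by unfold Spec_divide_grid_into_quarters; infer_instance

-- ===== CLAIM (what is proved, stated in full; the proofs are below) =====
def Claim_equal_divide_grid_into_quarters : Prop := ∀ (grid : List (List Int)), Dom_divide_grid_into_quarters grid → Pre_divide_grid_into_quarters grid → Spec_divide_grid_into_quarters grid (divide_grid_into_quarters grid)

-- ===== LEMMAS AND PROOFS =====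

-- a fold that appends to each component of a 4-tuple yields the four flatMaps
theorem quad_foldl {α β : Type} (l : List α) (g1 g2 g3 g4 : α → List β)
    (a b c d : List β) :
    l.foldl (fun s x => (s.1 ++ g1 x, s.2.1 ++ g2 x, s.2.2.1 ++ g3 x, s.2.2.2 ++ g4 x)) (a, b, c, d)
      = (a ++ l.flatMap g1, b ++ l.flatMap g2, c ++ l.flatMap g3, d ++ l.flatMap g4) := by
  induction l generalizing a b c d with
  | nil => simp
  | cons x xs ih => simp [List.foldl_cons, ih]

theorem flatMap_congr_mem {α β : Type} (l : List α) (f g : α → List β)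
    (h : ∀ x ∈ l, f x = g x) : l.flatMap f = l.flatMap g := by
  simp only [List.flatMap_eq_foldl]
  exact PySem.List.foldl_congr_mem l _ _ [] (fun acc x hx => by rw [h x hx])

-- a guarded flatMap over range(0, n) is the flatMap over the kept half of the range
theorem flatMap_if_lt {β : Type} (m n : Int) (h0 : 0 ≤ m) (h1 : m ≤ n) (g : Int → List β) :
    (PySem.List.pyRange 0 n 1).flatMap (fun i => if i < m then g i else []) =
      (PySem.List.pyRange 0 m 1).flatMap g := by
  rw [PySem.List.pyRange_one_append 0 m n h0 h1, List.flatMap_append,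
    flatMap_congr_mem (PySem.List.pyRange 0 m 1) _ g
      (fun i hi => if_pos (PySem.List.mem_pyRange_one.mp hi).2),
    flatMap_congr_mem (PySem.List.pyRange m n 1) _ (fun _ => [])
      (fun i hi => if_neg (by have := (PySem.List.mem_pyRange_one.mp hi).1; omega))]
  simp

theorem flatMap_if_ge {β : Type} (m n : Int) (h0 : 0 ≤ m) (h1 : m ≤ n) (g : Int → List β) :
    (PySem.List.pyRange 0 n 1).flatMap (fun i => if ¬ i < m then g i else []) =
      (PySem.List.pyRange m n 1).flatMap g := by
  rw [PySem.List.pyRange_one_append 0 m n h0 h1, List.flatMap_append,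
    flatMap_congr_mem (PySem.List.pyRange 0 m 1) _ (fun _ => [])
      (fun i hi => if_neg (by have := (PySem.List.mem_pyRange_one.mp hi).2; omega)),
    flatMap_congr_mem (PySem.List.pyRange m n 1) _ g
      (fun i hi => if_pos (by have := (PySem.List.mem_pyRange_one.mp hi).1; omega))]
  simp

-- classifying flatMap over the column range, with a constant row condition P
theorem flatMap_classify_lt {β : Type} (P : Prop) [Decidable P] (m n : Int)
    (h0 : 0 ≤ m) (h1 : m ≤ n) (f : Int → β) :
    (PySem.List.pyRange 0 n 1).flatMap (fun j => if P ∧ j < m then [f j] else []) =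
      if P then (PySem.List.pyRange 0 m 1).map f else [] := by
  by_cases hP : P
  · simp only [hP, true_and, if_true]
    rw [flatMap_if_lt m n h0 h1]
    exact Eq.symm List.map_eq_flatMap
  · simp [hP]

theorem flatMap_classify_ge {β : Type} (P : Prop) [Decidable P] (m n : Int)
    (h0 : 0 ≤ m) (h1 : m ≤ n) (f : Int → β) :
    (PySem.List.pyRange 0 n 1).flatMap (fun j => if P ∧ ¬ j < m then [f j] else []) =
      if P then (PySem.List.pyRange m n 1).map f else [] := by
  by_cases hP : P
  · simp only [hP, true_and, if_true]
    rw [flatMap_if_ge m n h0 h1]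
    exact Eq.symm List.map_eq_flatMap
  · simp [hP]

-- B's classifying nested fold equals A's four quadrant comprehensions
theorem quarters_key (rows cols : Int) (hrow0 : 0 ≤ rows) (hcol0 : 0 ≤ cols) :
    (PySem.List.pyRange 0 rows 1).foldl
      (fun s i => (PySem.List.pyRange 0 cols 1).foldl
        (fun (s : List (Int × Int) × List (Int × Int) × List (Int × Int) × List (Int × Int)) j =>
          if i < PySem.Int.floordiv rows 2 ∧ j < PySem.Int.floordiv cols 2 then
            (s.1 ++ [(i, j)], s.2.1, s.2.2.1, s.2.2.2)
          else if i < PySem.Int.floordiv rows 2 then (s.1, s.2.1 ++ [(i, j)], s.2.2.1, s.2.2.2)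
          else if j < PySem.Int.floordiv cols 2 then (s.1, s.2.1, s.2.2.1 ++ [(i, j)], s.2.2.2)
          else (s.1, s.2.1, s.2.2.1, s.2.2.2 ++ [(i, j)])) s)
      ([], [], [], [])
    = ((PySem.List.pyRange 0 (PySem.Int.floordiv rows 2) 1).flatMap
         (fun i => (PySem.List.pyRange 0 (PySem.Int.floordiv cols 2) 1).map (fun j => (i, j))),
       (PySem.List.pyRange 0 (PySem.Int.floordiv rows 2) 1).flatMap
         (fun i => (PySem.List.pyRange (PySem.Int.floordiv cols 2) cols 1).map (fun j => (i, j))),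
       (PySem.List.pyRange (PySem.Int.floordiv rows 2) rows 1).flatMap
         (fun i => (PySem.List.pyRange 0 (PySem.Int.floordiv cols 2) 1).map (fun j => (i, j))),
       (PySem.List.pyRange (PySem.Int.floordiv rows 2) rows 1).flatMap
         (fun i => (PySem.List.pyRange (PySem.Int.floordiv cols 2) cols 1).map (fun j => (i, j)))) := by
  set hr : Int := PySem.Int.floordiv rows 2 with hhr
  set hc : Int := PySem.Int.floordiv cols 2 with hhc
  have hhr' : hr = rows / 2 := PySem.Int.floordiv_eq_ediv_of_pos (by norm_num)
  have hhc' : hc = cols / 2 := PySem.Int.floordiv_eq_ediv_of_pos (by norm_num)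
  have hr0 : 0 ≤ hr := by rw [hhr']; omega
  have hrle : hr ≤ rows := by rw [hhr']; omega
  have hc0 : 0 ≤ hc := by rw [hhc']; omega
  have hcle : hc ≤ cols := by rw [hhc']; omega
  have step_eq : ∀ i : Int,
      (fun (s : List (Int × Int) × List (Int × Int) × List (Int × Int) × List (Int × Int)) j =>
        if i < hr ∧ j < hc then (s.1 ++ [(i, j)], s.2.1, s.2.2.1, s.2.2.2)
        else if i < hr then (s.1, s.2.1 ++ [(i, j)], s.2.2.1, s.2.2.2)
        else if j < hc then (s.1, s.2.1, s.2.2.1 ++ [(i, j)], s.2.2.2)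
        else (s.1, s.2.1, s.2.2.1, s.2.2.2 ++ [(i, j)]))
      = (fun s j =>
          (s.1 ++ (if i < hr ∧ j < hc then [(i, j)] else []),
           s.2.1 ++ (if i < hr ∧ ¬ j < hc then [(i, j)] else []),
           s.2.2.1 ++ (if ¬ i < hr ∧ j < hc then [(i, j)] else []),
           s.2.2.2 ++ (if ¬ i < hr ∧ ¬ j < hc then [(i, j)] else []))) := by
    intro i
    funext s j
    by_cases h1 : i < hr <;> by_cases h2 : j < hc <;> simp [h1, h2]
  have houter : (fun (s : List (Int × Int) × List (Int × Int) × List (Int × Int) × List (Int × Int)) i =>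
      (PySem.List.pyRange 0 cols 1).foldl
        (fun (s : List (Int × Int) × List (Int × Int) × List (Int × Int) × List (Int × Int)) j =>
          if i < hr ∧ j < hc then (s.1 ++ [(i, j)], s.2.1, s.2.2.1, s.2.2.2)
          else if i < hr then (s.1, s.2.1 ++ [(i, j)], s.2.2.1, s.2.2.2)
          else if j < hc then (s.1, s.2.1, s.2.2.1 ++ [(i, j)], s.2.2.2)
          else (s.1, s.2.1, s.2.2.1, s.2.2.2 ++ [(i, j)])) s)
      = (fun s i =>
          (s.1 ++ (if i < hr then (PySem.List.pyRange 0 hc 1).map (fun j => (i, j)) else []),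
           s.2.1 ++ (if i < hr then (PySem.List.pyRange hc cols 1).map (fun j => (i, j)) else []),
           s.2.2.1 ++ (if ¬ i < hr then (PySem.List.pyRange 0 hc 1).map (fun j => (i, j)) else []),
           s.2.2.2 ++ (if ¬ i < hr then (PySem.List.pyRange hc cols 1).map (fun j => (i, j)) else []))) := by
    funext s i
    rw [step_eq i]
    obtain ⟨a, b, c, d⟩ := s
    rw [quad_foldl,
      flatMap_classify_lt (i < hr) hc cols hc0 hcle,
      flatMap_classify_ge (i < hr) hc cols hc0 hcle,
      flatMap_classify_lt (¬ i < hr) hc cols hc0 hcle,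
      flatMap_classify_ge (¬ i < hr) hc cols hc0 hcle]
  rw [houter, quad_foldl,
    flatMap_if_lt hr rows hr0 hrle (fun i => (PySem.List.pyRange 0 hc 1).map (fun j => (i, j))),
    flatMap_if_lt hr rows hr0 hrle (fun i => (PySem.List.pyRange hc cols 1).map (fun j => (i, j))),
    flatMap_if_ge hr rows hr0 hrle (fun i => (PySem.List.pyRange 0 hc 1).map (fun j => (i, j))),
    flatMap_if_ge hr rows hr0 hrle (fun i => (PySem.List.pyRange hc cols 1).map (fun j => (i, j)))]
  simp

-- ===== VERDICT (by name: the statement is the Claim_ definition above) =====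
theorem divide_grid_into_quarters_spec : Claim_equal_divide_grid_into_quarters := by
  intro grid _ hpre
  unfold Spec_divide_grid_into_quarters divide_grid_into_quarters divide_grid_into_quarters_alt
  cases grid with
  | nil => exact absurd rfl hpre
  | cons row0 rest =>
    have hget : PySem.List.pyGet? (row0 :: rest) 0 = some row0 := by
      simp [PySem.List.pyGet?, PySem.List.pyIdx?]
    rw [hget]
    dsimp only
    rw [quarters_key ((row0 :: rest).length : Int) (row0.length : Int)
      (by positivity) (by positivity)]
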